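-- pv_equiv track=rewrite | github.com/WeiliangXing/Facebook-Data-Mining | bayes_classifier/CLASSIFIER.py | generate_feature_dic
-- ===== SOURCE A (Python) =====
-- def generate_feature_dic(input_list):
--     """
--     generate dictioanry for each feature
--     Note: here value in each dictionary's value is total frequency of each feature
--     :param input_list: input list of input file
--     :return:[dic, spam_dic, ham_dic] with feature as value
--     """
--     dic = {}
--     spam_dic = {}
--     ham_dic = {}
--     for m in input_list:
--         mail_type = m[1]
--         for i in range(3, len(m), 2):
--             if mail_type == "spam":
--                 if m[i-1] in spam_dic:
--                     # spam_dic[m[i-1]] = (spam_dic[m[i-1]][0] + int(m[i]), "spam")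
--                     spam_dic[m[i-1]] += int(m[i])
--                 else:
--                     spam_dic[m[i-1]] = int(m[i])
--             else:
--                 if m[i-1] in ham_dic:
--                     ham_dic[m[i-1]] += int(m[i])
--                 else:
--                     ham_dic[m[i-1]] = int(m[i])
--
--             if m[i-1] in dic:
--                 dic[m[i-1]] += int(m[i])
--             else:
--                 dic[m[i-1]] = int(m[i])
--
--     return [dic, spam_dic, ham_dic]
-- ===== SOURCE B (Python) =====
-- def _count_features(mails):
--     """Frequency dict of feature -> total count over the given mails."""
--     d = {}
--     for m in mails:
--         for i in range(3, len(m), 2):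
--             d[m[i - 1]] = d.get(m[i - 1], 0) + int(m[i])
--     return d
--
--
-- def generate_feature_dic(input_list):
--     spam = [m for m in input_list if m[1] == "spam"]
--     ham = [m for m in input_list if m[1] != "spam"]
--     return [_count_features(input_list), _count_features(spam), _count_features(ham)]
-- ===== Notes on version B (the rewrite author's own statement) =====
-- stated objective: simpler
-- what changed: One generic frequency-counting helper applied three times (to all mails, to the spam sublist, to the ham sublist) replaces the single loop that branches on mail type and maintains three dicts simultaneously.
import Mathlib
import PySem

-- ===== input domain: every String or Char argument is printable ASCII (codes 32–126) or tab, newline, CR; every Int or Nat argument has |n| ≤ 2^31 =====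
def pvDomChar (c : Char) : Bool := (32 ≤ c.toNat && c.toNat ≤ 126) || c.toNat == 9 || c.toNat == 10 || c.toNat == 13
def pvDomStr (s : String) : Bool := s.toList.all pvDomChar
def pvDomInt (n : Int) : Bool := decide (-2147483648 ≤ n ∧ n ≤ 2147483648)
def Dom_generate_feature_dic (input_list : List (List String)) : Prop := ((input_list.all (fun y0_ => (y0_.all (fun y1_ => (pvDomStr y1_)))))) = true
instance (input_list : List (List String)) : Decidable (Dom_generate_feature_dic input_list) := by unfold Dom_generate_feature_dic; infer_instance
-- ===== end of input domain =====

-- B replaces A's three-dicts-in-one-branching-loop with one generic counting helper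
-- applied to the whole list and to its spam/ham sublists (objective: simpler).

-- ===== PORT A =====
-- int(m[i]) / m[j]: Pre_ guarantees the parse succeeds and the indices are in range,
-- so the .getD defaults are never reached on admitted inputs.
def generate_feature_dic (input_list : List (List String)) : List (List (String × Int)) :=
  let z := input_list.foldl
    (fun (st : PySem.Dict String Int × PySem.Dict String Int × PySem.Dict String Int) m =>
      let mail_type := PySem.List.pyGetD m 1 ""
      (PySem.List.pyRange 3 (PySem.List.len m) 2).foldl (fun st i =>
        let (dic, spam_dic, ham_dic) := st
        let key := PySem.List.pyGetD m (i - 1) ""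
        let spam_dic :=
          if mail_type == "spam" then
            if spam_dic.contains key then
              spam_dic.insert key (spam_dic.getD key 0 + (PySem.Int.ofStr? (PySem.List.pyGetD m i "")).getD 0)
            else
              spam_dic.insert key ((PySem.Int.ofStr? (PySem.List.pyGetD m i "")).getD 0)
          else spam_dic
        let ham_dic :=
          if mail_type == "spam" then ham_dic
          else
            if ham_dic.contains key then
              ham_dic.insert key (ham_dic.getD key 0 + (PySem.Int.ofStr? (PySem.List.pyGetD m i "")).getD 0)
            else
              ham_dic.insert key ((PySem.Int.ofStr? (PySem.List.pyGetD m i "")).getD 0)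
        let dic :=
          if dic.contains key then
            dic.insert key (dic.getD key 0 + (PySem.Int.ofStr? (PySem.List.pyGetD m i "")).getD 0)
          else
            dic.insert key ((PySem.Int.ofStr? (PySem.List.pyGetD m i "")).getD 0)
        (dic, spam_dic, ham_dic)) st)
    (PySem.Dict.empty, PySem.Dict.empty, PySem.Dict.empty)
  [z.1.items, z.2.1.items, z.2.2.items]

-- ===== PORT B =====
-- port of Source B's _count_features
def pvCountFeatures (mails : List (List String)) : PySem.Dict String Int :=
  mails.foldl
    (fun d m =>
      (PySem.List.pyRange 3 (PySem.List.len m) 2).foldl (fun d i =>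
        d.insert (PySem.List.pyGetD m (i - 1) "")
          (d.getD (PySem.List.pyGetD m (i - 1) "") 0 +
            (PySem.Int.ofStr? (PySem.List.pyGetD m i "")).getD 0)) d)
    PySem.Dict.empty

def generate_feature_dic_alt (input_list : List (List String)) : List (List (String × Int)) :=
  let spam := input_list.filter (fun m => PySem.List.pyGetD m 1 "" == "spam")
  let ham := input_list.filter (fun m => !(PySem.List.pyGetD m 1 "" == "spam"))
  [(pvCountFeatures input_list).items, (pvCountFeatures spam).items, (pvCountFeatures ham).items]

-- ===== PRECONDITION & SPEC =====
-- A raises IndexError on any mail shorter than 2 entries (m[1]) and ValueError when a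
-- count field int(m[i]) is not an int literal; Pre_ excludes exactly those inputs.
def Pre_generate_feature_dic (input_list : List (List String)) : Prop :=
  ∀ m ∈ input_list, 2 ≤ m.length ∧
    ∀ i ∈ PySem.List.pyRange 3 (PySem.List.len m) 2,
      ((PySem.List.pyGet? m i).bind PySem.Int.ofStr?).isSome
instance (input_list : List (List String)) : Decidable (Pre_generate_feature_dic input_list) := by
  unfold Pre_generate_feature_dic; infer_instance

def pvWitness_generate_feature_dic : List (List String) :=
  [["m1", "spam", "foo", "2", "bar", "3"], ["m2", "ham", "foo", "1"]]

def Spec_generate_feature_dic (input_list : List (List String)) (out : List (List (String × Int))) : Prop := out = generate_feature_dic_alt input_list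
instance (input_list : List (List String)) (out : List (List (String × Int))) : Decidable (Spec_generate_feature_dic input_list out) := by unfold Spec_generate_feature_dic; infer_instance

-- ===== CLAIM (what is proved, stated in full; the proofs are below) =====
def Claim_equal_generate_feature_dic : Prop := ∀ (input_list : List (List String)), Dom_generate_feature_dic input_list → Pre_generate_feature_dic input_list → Spec_generate_feature_dic input_list (generate_feature_dic input_list)

-- ===== LEMMAS AND PROOFS =====

-- A's "if key present then add else insert" is B's unconditional get-or-default insert.
theorem pv_step_eq (d : PySem.Dict String Int) (k : String) (v : Int) :
    (if d.contains k then d.insert k (d.getD k 0 + v) else d.insert k v)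
      = d.insert k (d.getD k 0 + v) := by
  by_cases h : d.contains k = true
  · simp [h]
  · simp only [Bool.not_eq_true] at h
    simp only [h, Bool.false_eq_true, if_false]
    rw [PySem.Dict.getD_of_not_contains d 0 h, zero_add]

-- a fold that updates the first two components of a triple componentwise
theorem pv_foldl_tri_spam {a b : Type} (f : b -> a -> b) (l : List a) (x y z : b) :
    l.foldl (fun st v => (f st.1 v, f st.2.1 v, st.2.2)) (x, y, z)
      = (l.foldl f x, l.foldl f y, z) := by
  induction l generalizing x y z with
  | nil => rfl
  | cons v l ih => simp only [List.foldl_cons, ih]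

-- a fold that updates the first and third components of a triple componentwise
theorem pv_foldl_tri_ham {a b : Type} (f : b -> a -> b) (l : List a) (x y z : b) :
    l.foldl (fun st v => (f st.1 v, st.2.1, f st.2.2 v)) (x, y, z)
      = (l.foldl f x, y, l.foldl f z) := by
  induction l generalizing x y z with
  | nil => rfl
  | cons v l ih => simp only [List.foldl_cons, ih]

-- One spam mail's inner loop: updates dic and spam_dic by B's counting fold, leaves ham_dic.
theorem pv_inner_spam (m : List String) (h : (PySem.List.pyGetD m 1 "" == "spam") = true)
    (dic spam_dic ham_dic : PySem.Dict String Int) :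
    (PySem.List.pyRange 3 (PySem.List.len m) 2).foldl (fun st i =>
          let (dic, spam_dic, ham_dic) := st
          let key := PySem.List.pyGetD m (i - 1) ""
          let spam_dic :=
            if PySem.List.pyGetD m 1 "" == "spam" then
              if spam_dic.contains key then
                spam_dic.insert key (spam_dic.getD key 0 + (PySem.Int.ofStr? (PySem.List.pyGetD m i "")).getD 0)
              else
                spam_dic.insert key ((PySem.Int.ofStr? (PySem.List.pyGetD m i "")).getD 0)
            else spam_dic
          let ham_dic :=
            if PySem.List.pyGetD m 1 "" == "spam" then ham_dic
            else
              if ham_dic.contains key then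
                ham_dic.insert key (ham_dic.getD key 0 + (PySem.Int.ofStr? (PySem.List.pyGetD m i "")).getD 0)
              else
                ham_dic.insert key ((PySem.Int.ofStr? (PySem.List.pyGetD m i "")).getD 0)
          let dic :=
            if dic.contains key then
              dic.insert key (dic.getD key 0 + (PySem.Int.ofStr? (PySem.List.pyGetD m i "")).getD 0)
            else
              dic.insert key ((PySem.Int.ofStr? (PySem.List.pyGetD m i "")).getD 0)
          (dic, spam_dic, ham_dic)) (dic, spam_dic, ham_dic)
      = (((PySem.List.pyRange 3 (PySem.List.len m) 2).foldl (fun d i =>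
        d.insert (PySem.List.pyGetD m (i - 1) "")
          (d.getD (PySem.List.pyGetD m (i - 1) "") 0 +
            (PySem.Int.ofStr? (PySem.List.pyGetD m i "")).getD 0)) dic), ((PySem.List.pyRange 3 (PySem.List.len m) 2).foldl (fun d i =>
        d.insert (PySem.List.pyGetD m (i - 1) "")
          (d.getD (PySem.List.pyGetD m (i - 1) "") 0 +
            (PySem.Int.ofStr? (PySem.List.pyGetD m i "")).getD 0)) spam_dic), ham_dic) := by
  simp only [h, if_true, pv_step_eq]
  exact pv_foldl_tri_spam
    (fun (d : PySem.Dict String Int) (i : Int) =>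
        d.insert (PySem.List.pyGetD m (i - 1) "")
          (d.getD (PySem.List.pyGetD m (i - 1) "") 0 +
            (PySem.Int.ofStr? (PySem.List.pyGetD m i "")).getD 0))
    (PySem.List.pyRange 3 (PySem.List.len m) 2) dic spam_dic ham_dic

-- One non-spam mail's inner loop: updates dic and ham_dic by B's counting fold, leaves spam_dic.
theorem pv_inner_ham (m : List String) (h : (PySem.List.pyGetD m 1 "" == "spam") = false)
    (dic spam_dic ham_dic : PySem.Dict String Int) :
    (PySem.List.pyRange 3 (PySem.List.len m) 2).foldl (fun st i =>
          let (dic, spam_dic, ham_dic) := st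
          let key := PySem.List.pyGetD m (i - 1) ""
          let spam_dic :=
            if PySem.List.pyGetD m 1 "" == "spam" then
              if spam_dic.contains key then
                spam_dic.insert key (spam_dic.getD key 0 + (PySem.Int.ofStr? (PySem.List.pyGetD m i "")).getD 0)
              else
                spam_dic.insert key ((PySem.Int.ofStr? (PySem.List.pyGetD m i "")).getD 0)
            else spam_dic
          let ham_dic :=
            if PySem.List.pyGetD m 1 "" == "spam" then ham_dic
            else
              if ham_dic.contains key then
                ham_dic.insert key (ham_dic.getD key 0 + (PySem.Int.ofStr? (PySem.List.pyGetD m i "")).getD 0)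
              else
                ham_dic.insert key ((PySem.Int.ofStr? (PySem.List.pyGetD m i "")).getD 0)
          let dic :=
            if dic.contains key then
              dic.insert key (dic.getD key 0 + (PySem.Int.ofStr? (PySem.List.pyGetD m i "")).getD 0)
            else
              dic.insert key ((PySem.Int.ofStr? (PySem.List.pyGetD m i "")).getD 0)
          (dic, spam_dic, ham_dic)) (dic, spam_dic, ham_dic)
      = (((PySem.List.pyRange 3 (PySem.List.len m) 2).foldl (fun d i =>
        d.insert (PySem.List.pyGetD m (i - 1) "")
          (d.getD (PySem.List.pyGetD m (i - 1) "") 0 +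
            (PySem.Int.ofStr? (PySem.List.pyGetD m i "")).getD 0)) dic), spam_dic, ((PySem.List.pyRange 3 (PySem.List.len m) 2).foldl (fun d i =>
        d.insert (PySem.List.pyGetD m (i - 1) "")
          (d.getD (PySem.List.pyGetD m (i - 1) "") 0 +
            (PySem.Int.ofStr? (PySem.List.pyGetD m i "")).getD 0)) ham_dic)) := by
  simp only [h, Bool.false_eq_true, if_false, pv_step_eq]
  exact pv_foldl_tri_ham
    (fun (d : PySem.Dict String Int) (i : Int) =>
        d.insert (PySem.List.pyGetD m (i - 1) "")
          (d.getD (PySem.List.pyGetD m (i - 1) "") 0 +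
            (PySem.Int.ofStr? (PySem.List.pyGetD m i "")).getD 0))
    (PySem.List.pyRange 3 (PySem.List.len m) 2) dic spam_dic ham_dic

-- The whole loop: A's fold from any start equals B's counting fold continued on the
-- full list / the spam sublist / the ham sublist.
theorem pv_outer_decomp (ms : List (List String))
    (dic spam_dic ham_dic : PySem.Dict String Int) :
    ms.foldl
      (fun (st : PySem.Dict String Int × PySem.Dict String Int × PySem.Dict String Int) m =>
        let mail_type := PySem.List.pyGetD m 1 ""
        (PySem.List.pyRange 3 (PySem.List.len m) 2).foldl (fun st i =>
          let (dic, spam_dic, ham_dic) := st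
          let key := PySem.List.pyGetD m (i - 1) ""
          let spam_dic :=
            if mail_type == "spam" then
              if spam_dic.contains key then
                spam_dic.insert key (spam_dic.getD key 0 + (PySem.Int.ofStr? (PySem.List.pyGetD m i "")).getD 0)
              else
                spam_dic.insert key ((PySem.Int.ofStr? (PySem.List.pyGetD m i "")).getD 0)
            else spam_dic
          let ham_dic :=
            if mail_type == "spam" then ham_dic
            else
              if ham_dic.contains key then
                ham_dic.insert key (ham_dic.getD key 0 + (PySem.Int.ofStr? (PySem.List.pyGetD m i "")).getD 0)
              else
                ham_dic.insert key ((PySem.Int.ofStr? (PySem.List.pyGetD m i "")).getD 0)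
          let dic :=
            if dic.contains key then
              dic.insert key (dic.getD key 0 + (PySem.Int.ofStr? (PySem.List.pyGetD m i "")).getD 0)
            else
              dic.insert key ((PySem.Int.ofStr? (PySem.List.pyGetD m i "")).getD 0)
          (dic, spam_dic, ham_dic)) st)
      (dic, spam_dic, ham_dic)
      = ((ms.foldl (fun d m =>
            (PySem.List.pyRange 3 (PySem.List.len m) 2).foldl (fun d i =>
              d.insert (PySem.List.pyGetD m (i - 1) "")
                (d.getD (PySem.List.pyGetD m (i - 1) "") 0 +
                  (PySem.Int.ofStr? (PySem.List.pyGetD m i "")).getD 0)) d) dic),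
         ((ms.filter (fun m => PySem.List.pyGetD m 1 "" == "spam")).foldl (fun d m =>
            (PySem.List.pyRange 3 (PySem.List.len m) 2).foldl (fun d i =>
              d.insert (PySem.List.pyGetD m (i - 1) "")
                (d.getD (PySem.List.pyGetD m (i - 1) "") 0 +
                  (PySem.Int.ofStr? (PySem.List.pyGetD m i "")).getD 0)) d) spam_dic),
         ((ms.filter (fun m => !(PySem.List.pyGetD m 1 "" == "spam"))).foldl (fun d m =>
            (PySem.List.pyRange 3 (PySem.List.len m) 2).foldl (fun d i =>
              d.insert (PySem.List.pyGetD m (i - 1) "")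
                (d.getD (PySem.List.pyGetD m (i - 1) "") 0 +
                  (PySem.Int.ofStr? (PySem.List.pyGetD m i "")).getD 0)) d) ham_dic)) := by
  induction ms generalizing dic spam_dic ham_dic with
  | nil => simp
  | cons m ms ih =>
      simp only [List.foldl_cons, List.filter_cons]
      by_cases h : (PySem.List.pyGetD m 1 "" == "spam") = true
      · rw [pv_inner_spam m h dic spam_dic ham_dic, ih]
        simp only [h, if_true, Bool.not_true, Bool.false_eq_true, if_false, List.foldl_cons]
      · simp only [Bool.not_eq_true] at h
        rw [pv_inner_ham m h dic spam_dic ham_dic, ih]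
        simp only [h, Bool.false_eq_true, if_false, Bool.not_false, if_true, List.foldl_cons]

-- ===== VERDICT (by name: the statement is the Claim_ definition above) =====
theorem generate_feature_dic_spec : Claim_equal_generate_feature_dic := by
  intro input_list _ _
  unfold Spec_generate_feature_dic generate_feature_dic generate_feature_dic_alt pvCountFeatures
  rw [pv_outer_decomp]
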